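-- pv_equiv track=rewrite | github.com/eerytea/d20-fight-club | core/spells_meta.py | count_spell_tags
-- ===== SOURCE A (Python) =====
-- from typing import Dict, Any, List, Tuple
--
-- SPELLS_CATALOG: Dict[str, Dict[str, Any]] = {
--     # Damage cantrips (examples; rename to your canonical names later)
--     "Arcane Bolt": {"tags": ["ranged"], "base_damage_cantrip": True, "die": "1d10"},
--     "Fire Bolt":   {"tags": ["ranged"], "base_damage_cantrip": True, "die": "1d10"},
--     # Utility examples (non-damaging)
--     "Mending Chant": {"tags": ["healing"]},
--     "Battle Hymn":   {"tags": ["buff"]},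
--     "Sapping Hex":   {"tags": ["debuff"]},
--     "Flame Burst":   {"tags": ["aoe", "ranged"]},  # leveled example (not a cantrip)
-- }
--
-- DEFAULT_UNKNOWN_SPELL_TAGS: List[str] = []
--
-- def tags_for_spell(name: str) -> List[str]:
--     meta = SPELLS_CATALOG.get(str(name), {})
--     return list(meta.get("tags", DEFAULT_UNKNOWN_SPELL_TAGS))
--
-- def count_spell_tags(player: Dict[str, Any]) -> Dict[str, int]:
--     """
--     Count known spells by our role-relevant tags.
--     """
--     known = player.get("known_spells") or []
--     out = {"buff": 0, "debuff": 0, "healing": 0, "ranged": 0, "aoe": 0}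
--     for s in known:
--         for t in tags_for_spell(s):
--             if t in out:
--                 out[t] += 1
--     return out
-- ===== SOURCE B (Python) =====
-- from typing import Dict, Any, List
--
-- SPELLS_CATALOG: Dict[str, Dict[str, Any]] = {
--     "Arcane Bolt": {"tags": ["ranged"], "base_damage_cantrip": True, "die": "1d10"},
--     "Fire Bolt":   {"tags": ["ranged"], "base_damage_cantrip": True, "die": "1d10"},
--     "Mending Chant": {"tags": ["healing"]},
--     "Battle Hymn":   {"tags": ["buff"]},
--     "Sapping Hex":   {"tags": ["debuff"]},
--     "Flame Burst":   {"tags": ["aoe", "ranged"]},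
-- }
--
-- DEFAULT_UNKNOWN_SPELL_TAGS: List[str] = []
--
-- def tags_for_spell(name: str) -> List[str]:
--     meta = SPELLS_CATALOG.get(str(name), {})
--     return list(meta.get("tags", DEFAULT_UNKNOWN_SPELL_TAGS))
--
-- def count_spell_tags(player: Dict[str, Any]) -> Dict[str, int]:
--     known = player.get("known_spells") or []
--     # key-major: no mutable counter dict at all; each of the five counts is
--     # computed independently as a sum of per-spell tag multiplicities.
--     return {k: sum(tags_for_spell(s).count(k) for s in known)
--             for k in ("buff", "debuff", "healing", "ranged", "aoe")}
-- ===== Notes on version B (the rewrite author's own statement) =====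
-- stated objective: alternative
-- what changed: B inverts the traversal order: instead of one spell-major pass maintaining a pre-seeded mutable counter dict with per-tag membership guards, B builds the result key-major with no counter dict at all, computing each of the five counts independently as sum(tags_for_spell(s).count(k) for s in known).
import Mathlib
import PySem

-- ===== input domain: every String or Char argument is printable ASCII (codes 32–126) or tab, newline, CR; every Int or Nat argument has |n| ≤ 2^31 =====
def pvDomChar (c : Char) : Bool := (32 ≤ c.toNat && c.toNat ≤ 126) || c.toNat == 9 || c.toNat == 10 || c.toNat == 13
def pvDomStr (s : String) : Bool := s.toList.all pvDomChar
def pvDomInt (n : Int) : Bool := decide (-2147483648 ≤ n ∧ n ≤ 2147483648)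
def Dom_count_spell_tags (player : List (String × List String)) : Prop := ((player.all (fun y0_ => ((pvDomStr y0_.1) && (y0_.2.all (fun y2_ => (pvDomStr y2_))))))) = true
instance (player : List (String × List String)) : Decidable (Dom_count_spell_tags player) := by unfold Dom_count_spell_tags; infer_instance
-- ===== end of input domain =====

-- B inverts the traversal: key-major with no counter dict — each of the five counts is
-- an independent sum of per-spell tag multiplicities (alternative decomposition, same cost).


-- ===== PORT A =====
-- SPELLS_CATALOG, reduced to the only field the function reads (every entry has a "tags" key)
def SPELLS_CATALOG_tags : PySem.Dict String (List String) := PySem.Dict.ofList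
  [("Arcane Bolt", ["ranged"]), ("Fire Bolt", ["ranged"]), ("Mending Chant", ["healing"]),
   ("Battle Hymn", ["buff"]), ("Sapping Hex", ["debuff"]), ("Flame Burst", ["aoe", "ranged"])]

-- meta.get("tags", DEFAULT_UNKNOWN_SPELL_TAGS) with DEFAULT_UNKNOWN_SPELL_TAGS = []
def tags_for_spell (name : String) : List String :=
  (SPELLS_CATALOG_tags.get? name).getD []

def count_spell_tags (player : List (String × List String)) : List (String × Int) :=
  let known := ((PySem.Dict.mk player).get? "known_spells").getD []
  let out := known.foldl (fun out s =>
    (tags_for_spell s).foldl (fun out t =>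
      if out.contains t then out.modify t 0 (· + 1) else out) out)
    (PySem.Dict.ofList [("buff", 0), ("debuff", 0), ("healing", 0), ("ranged", 0), ("aoe", 0)])
  out.items

-- ===== PORT B =====
def count_spell_tags_alt (player : List (String × List String)) : List (String × Int) :=
  let known := ((PySem.Dict.mk player).get? "known_spells").getD []
  ["buff", "debuff", "healing", "ranged", "aoe"].map (fun k =>
    (k, known.foldl (fun acc s => acc + ((tags_for_spell s).count k : Int)) 0))

-- ===== PRECONDITION & SPEC =====
def Spec_count_spell_tags (player : List (String × List String)) (out : List (String × Int)) : Prop := out = count_spell_tags_alt player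
instance (player : List (String × List String)) (out : List (String × Int)) : Decidable (Spec_count_spell_tags player out) := by unfold Spec_count_spell_tags; infer_instance

-- ===== CLAIM (what is proved, stated in full; the proofs are below) =====
def Claim_equal_count_spell_tags : Prop := ∀ (player : List (String × List String)), Dom_count_spell_tags player → Spec_count_spell_tags player (count_spell_tags player)

-- ===== LEMMAS AND PROOFS =====

-- One step of A's guarded loop on the five-key literal dict, for an arbitrary tag t.
theorem stepA_eval (b d h r a : Int) (t : String) :
    (if (PySem.Dict.mk [("buff", b), ("debuff", d), ("healing", h), ("ranged", r), ("aoe", a)]).contains t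
     then (PySem.Dict.mk [("buff", b), ("debuff", d), ("healing", h), ("ranged", r), ("aoe", a)]).modify t 0 (· + 1)
     else PySem.Dict.mk [("buff", b), ("debuff", d), ("healing", h), ("ranged", r), ("aoe", a)])
    = PySem.Dict.mk [("buff", if t = "buff" then b + 1 else b),
        ("debuff", if t = "debuff" then d + 1 else d),
        ("healing", if t = "healing" then h + 1 else h),
        ("ranged", if t = "ranged" then r + 1 else r),
        ("aoe", if t = "aoe" then a + 1 else a)] := by
  by_cases h1 : t = "buff"
  · subst h1; simp [PySem.Dict.contains, PySem.Dict.modify, PySem.Dict.insert, PySem.Dict.getD, PySem.Dict.get?]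
  by_cases h2 : t = "debuff"
  · subst h2; simp [PySem.Dict.contains, PySem.Dict.modify, PySem.Dict.insert, PySem.Dict.getD, PySem.Dict.get?]
  by_cases h3 : t = "healing"
  · subst h3; simp [PySem.Dict.contains, PySem.Dict.modify, PySem.Dict.insert, PySem.Dict.getD, PySem.Dict.get?]
  by_cases h4 : t = "ranged"
  · subst h4; simp [PySem.Dict.contains, PySem.Dict.modify, PySem.Dict.insert, PySem.Dict.getD, PySem.Dict.get?]
  by_cases h5 : t = "aoe"
  · subst h5; simp [PySem.Dict.contains, PySem.Dict.modify, PySem.Dict.insert, PySem.Dict.getD, PySem.Dict.get?]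
  · simp [PySem.Dict.contains, h1, h2, h3, h4, h5, Ne.symm h1, Ne.symm h2, Ne.symm h3, Ne.symm h4, Ne.symm h5]

-- A's guarded counting loop over the five-key literal dict, characterised by tag counts.
theorem countA_fold (ts : List String) (b d h r a : Int) :
    ts.foldl (fun out t => if PySem.Dict.contains out t then out.modify t 0 (· + 1) else out)
      (PySem.Dict.mk [("buff", b), ("debuff", d), ("healing", h), ("ranged", r), ("aoe", a)])
    = PySem.Dict.mk [("buff", b + ts.count "buff"), ("debuff", d + ts.count "debuff"),
        ("healing", h + ts.count "healing"), ("ranged", r + ts.count "ranged"),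
        ("aoe", a + ts.count "aoe")] := by
  induction ts generalizing b d h r a with
  | nil => simp
  | cons t ts ih =>
    rw [List.foldl_cons, stepA_eval, ih]
    simp only [List.count_cons, PySem.Dict.mk.injEq, List.cons.injEq, Prod.mk.injEq]
    and_intros <;> first
      | trivial
      | (split_ifs with hc <;> simp_all; ring)

-- B's per-key sum equals the count of k in the flattened tag list.
theorem sumB_count (k : String) (xs : List String) (c : Int) :
    xs.foldl (fun acc s => acc + ((tags_for_spell s).count k : Int)) c
      = c + ((xs.flatMap tags_for_spell).count k : Int) := by
  induction xs generalizing c with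
  | nil => simp
  | cons x xs ih =>
    rw [List.foldl_cons, ih]
    simp [List.count_append]
    ring

-- ===== VERDICT (by name: the statement is the Claim_ definition above) =====
theorem count_spell_tags_spec : Claim_equal_count_spell_tags := by
  intro player _
  unfold Spec_count_spell_tags
  show count_spell_tags player = count_spell_tags_alt player
  simp only [count_spell_tags, count_spell_tags_alt]
  rw [← List.foldl_flatMap]
  rw [show (PySem.Dict.ofList [("buff", (0:Int)), ("debuff", 0), ("healing", 0), ("ranged", 0), ("aoe", 0)])
      = PySem.Dict.mk [("buff", 0), ("debuff", 0), ("healing", 0), ("ranged", 0), ("aoe", 0)] from rfl]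
  rw [countA_fold]
  simp [sumB_count]
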